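-- pv_equiv track=rewrite | github.com/sgttomas/chirality-piping | tools/validation/validate_domain_decomposition_integrity.py | manifest_rollup
-- ===== SOURCE A (Python) =====
-- def manifest_rollup(rows: list[dict[str, str]]) -> str:
--     states = {row.get("CONTENT_DISPOSITION_STATE", "").strip() for row in rows}
--     gates = {row.get("FACTUAL_USE_GATE", "").strip() for row in rows}
--     if any(not state or state == "PENDING" for state in states):
--         return "PENDING"
--     if "BLOCKED" in states or "BLOCK_FACTUAL_USE" in gates:
--         return "BLOCKED"
--     if "DEFERRED" in states:
--         return "DEFERRED"
--     return "COMPLETE"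
-- ===== SOURCE B (Python) =====
-- def manifest_rollup(rows: list[dict[str, str]]) -> str:
--     # Single pass: score each row's severity, keep the running maximum,
--     # then translate the worst severity to a status.
--     def severity(row):
--         state = row.get("CONTENT_DISPOSITION_STATE", "").strip()
--         gate = row.get("FACTUAL_USE_GATE", "").strip()
--         if not state or state == "PENDING":
--             return 3
--         if state == "BLOCKED" or gate == "BLOCK_FACTUAL_USE":
--             return 2
--         if state == "DEFERRED":
--             return 1
--         return 0
--
--     worst = 0
--     for row in rows:
--         worst = max(worst, severity(row))
--         if worst == 3:
--             break
--     if worst >= 3: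
--         return "PENDING"
--     if worst == 2:
--         return "BLOCKED"
--     if worst == 1:
--         return "DEFERRED"
--     return "COMPLETE"
-- ===== Notes on version B (the rewrite author's own statement) =====
-- stated objective: alternative
-- what changed: Replaces the two set comprehensions and the priority cascade of membership tests with a single pass that scores each row's severity (3=pending,2=blocked,1=deferred,0=complete), takes the running maximum with an early exit, and maps the worst severity back to a status.
import Mathlib
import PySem

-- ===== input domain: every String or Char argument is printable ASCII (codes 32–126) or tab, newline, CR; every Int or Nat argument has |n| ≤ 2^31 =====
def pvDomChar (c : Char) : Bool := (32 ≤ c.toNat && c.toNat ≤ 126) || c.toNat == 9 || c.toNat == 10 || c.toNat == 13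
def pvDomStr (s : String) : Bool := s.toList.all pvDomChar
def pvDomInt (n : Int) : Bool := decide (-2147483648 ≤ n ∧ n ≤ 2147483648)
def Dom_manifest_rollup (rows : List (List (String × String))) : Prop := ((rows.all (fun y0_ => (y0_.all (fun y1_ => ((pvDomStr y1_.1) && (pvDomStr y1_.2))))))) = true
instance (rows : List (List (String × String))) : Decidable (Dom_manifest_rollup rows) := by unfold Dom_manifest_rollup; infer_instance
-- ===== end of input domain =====

-- B replaces A's two set comprehensions + membership cascade by a one-pass
-- per-row severity maximum; equivalence is proved on the whole domain.

-- ===== PORT A =====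
def manifest_rollup (rows : List (List (String × String))) : String :=
  let states : PySem.Set String :=
    PySem.Set.ofList (rows.map (fun row => PySem.Str.strip (PySem.Dict.getD ⟨row⟩ "CONTENT_DISPOSITION_STATE" "")))
  let gates : PySem.Set String :=
    PySem.Set.ofList (rows.map (fun row => PySem.Str.strip (PySem.Dict.getD ⟨row⟩ "FACTUAL_USE_GATE" "")))
  if states.any (fun state => state == "" || state == "PENDING") then "PENDING"
  else if PySem.Set.contains states "BLOCKED" || PySem.Set.contains gates "BLOCK_FACTUAL_USE" then "BLOCKED"
  else if PySem.Set.contains states "DEFERRED" then "DEFERRED"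
  else "COMPLETE"

-- ===== PORT B =====
def pvSeverity (row : List (String × String)) : Int :=
  let state := PySem.Str.strip (PySem.Dict.getD ⟨row⟩ "CONTENT_DISPOSITION_STATE" "")
  let gate := PySem.Str.strip (PySem.Dict.getD ⟨row⟩ "FACTUAL_USE_GATE" "")
  if state == "" || state == "PENDING" then 3
  else if state == "BLOCKED" || gate == "BLOCK_FACTUAL_USE" then 2
  else if state == "DEFERRED" then 1
  else 0

def pvWorstLoop : List (List (String × String)) → Int → Int
  | [], worst => worst
  | row :: rest, worst =>
    let w := max worst (pvSeverity row)
    if w == 3 then w else pvWorstLoop rest w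

def manifest_rollup_alt (rows : List (List (String × String))) : String :=
  let worst := pvWorstLoop rows 0
  if worst ≥ 3 then "PENDING"
  else if worst == 2 then "BLOCKED"
  else if worst == 1 then "DEFERRED"
  else "COMPLETE"

-- ===== PRECONDITION & SPEC =====
def Spec_manifest_rollup (rows : List (List (String × String))) (out : String) : Prop := out = manifest_rollup_alt rows
instance (rows : List (List (String × String))) (out : String) : Decidable (Spec_manifest_rollup rows out) := by unfold Spec_manifest_rollup; infer_instance

-- ===== CLAIM (what is proved, stated in full; the proofs are below) =====
def Claim_equal_manifest_rollup : Prop := ∀ (rows : List (List (String × String))), Dom_manifest_rollup rows → Spec_manifest_rollup rows (manifest_rollup rows)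

-- ===== LEMMAS AND PROOFS =====

-- maximum of the severities, structurally
def pvWorst : List (List (String × String)) → Int
  | [] => 0
  | row :: rest => max (pvSeverity row) (pvWorst rest)

theorem pvSeverity_cases (row : List (String × String)) :
    pvSeverity row = 0 ∨ pvSeverity row = 1 ∨ pvSeverity row = 2 ∨ pvSeverity row = 3 := by
  unfold pvSeverity
  dsimp only
  split_ifs <;> simp

theorem pvWorst_nonneg (rows : List (List (String × String))) : 0 ≤ pvWorst rows := by
  induction rows with
  | nil => simp [pvWorst]
  | cons r rs ih => simp [pvWorst]; right; exact ih

theorem pvWorst_le_three (rows : List (List (String × String))) : pvWorst rows ≤ 3 := by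
  induction rows with
  | nil => simp [pvWorst]
  | cons r rs ih =>
    simp only [pvWorst, max_le_iff]
    refine ⟨?_, ih⟩
    rcases pvSeverity_cases r with h | h | h | h <;> omega

theorem pvWorst_ge_of_mem {rows : List (List (String × String))} {r : List (String × String)}
    (h : r ∈ rows) : pvSeverity r ≤ pvWorst rows := by
  induction rows with
  | nil => simp at h
  | cons x xs ih =>
    rcases List.mem_cons.mp h with h | h
    · subst h; simp [pvWorst]
    · simp only [pvWorst, le_max_iff]; right; exact ih h

theorem pvWorst_le {rows : List (List (String × String))} {n : Int}
    (h0 : 0 ≤ n) (h : ∀ r ∈ rows, pvSeverity r ≤ n) : pvWorst rows ≤ n := by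
  induction rows with
  | nil => simpa [pvWorst]
  | cons x xs ih =>
    simp only [pvWorst, max_le_iff]
    exact ⟨h x (by simp), ih (fun r hr => h r (by simp [hr]))⟩

theorem pvWorstLoop_eq (rows : List (List (String × String))) (worst : Int)
    (h0 : 0 ≤ worst) (h3 : worst ≤ 3) : pvWorstLoop rows worst = max worst (pvWorst rows) := by
  induction rows generalizing worst with
  | nil => simp [pvWorstLoop, pvWorst, max_eq_left h0]
  | cons r rs ih =>
    simp only [pvWorstLoop, pvWorst]
    split_ifs with h
    · -- early exit: max worst (sev r) = 3
      have hw : max worst (pvSeverity r) = 3 := by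
        have := beq_iff_eq.mp h; exact this
      have hle : pvWorst rs ≤ 3 := pvWorst_le_three rs
      have hsev : pvSeverity r ≤ max (pvSeverity r) (pvWorst rs) := le_max_left _ _
      rcases max_cases worst (pvSeverity r) with ⟨he, _⟩ | ⟨he, _⟩ <;>
      · rw [hw]
        have h1 : pvSeverity r ≤ 3 := by rcases pvSeverity_cases r with h|h|h|h <;> omega
        have h2 : 0 ≤ pvWorst rs := pvWorst_nonneg rs
        omega
    · have hsev3 : pvSeverity r ≤ 3 := by rcases pvSeverity_cases r with h|h|h|h <;> omega
      have hsev0 : 0 ≤ pvSeverity r := by rcases pvSeverity_cases r with h|h|h|h <;> omega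
      rw [ih _ (by omega) (by omega)]
      rw [max_assoc]

-- per-row predicate bridges between A's conditions and severities
theorem sev_eq_three_iff (r : List (String × String)) :
    pvSeverity r = 3 ↔
      ((PySem.Str.strip (PySem.Dict.getD ⟨r⟩ "CONTENT_DISPOSITION_STATE" "") == "" ||
        PySem.Str.strip (PySem.Dict.getD ⟨r⟩ "CONTENT_DISPOSITION_STATE" "") == "PENDING") = true) := by
  unfold pvSeverity
  dsimp only
  split_ifs <;> simp_all

theorem sev_eq_two_iff (r : List (String × String))
    (hnp : ¬ ((PySem.Str.strip (PySem.Dict.getD ⟨r⟩ "CONTENT_DISPOSITION_STATE" "") == "" ||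
        PySem.Str.strip (PySem.Dict.getD ⟨r⟩ "CONTENT_DISPOSITION_STATE" "") == "PENDING") = true)) :
    pvSeverity r = 2 ↔
      ((PySem.Str.strip (PySem.Dict.getD ⟨r⟩ "CONTENT_DISPOSITION_STATE" "") == "BLOCKED" ||
        PySem.Str.strip (PySem.Dict.getD ⟨r⟩ "FACTUAL_USE_GATE" "") == "BLOCK_FACTUAL_USE") = true) := by
  unfold pvSeverity
  dsimp only
  split_ifs <;> simp_all

theorem sev_eq_one_iff (r : List (String × String))
    (hnp : ¬ ((PySem.Str.strip (PySem.Dict.getD ⟨r⟩ "CONTENT_DISPOSITION_STATE" "") == "" ||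
        PySem.Str.strip (PySem.Dict.getD ⟨r⟩ "CONTENT_DISPOSITION_STATE" "") == "PENDING") = true))
    (hnb : ¬ ((PySem.Str.strip (PySem.Dict.getD ⟨r⟩ "CONTENT_DISPOSITION_STATE" "") == "BLOCKED" ||
        PySem.Str.strip (PySem.Dict.getD ⟨r⟩ "FACTUAL_USE_GATE" "") == "BLOCK_FACTUAL_USE") = true)) :
    pvSeverity r = 1 ↔
      (PySem.Str.strip (PySem.Dict.getD ⟨r⟩ "CONTENT_DISPOSITION_STATE" "") == "DEFERRED") = true := by
  unfold pvSeverity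
  dsimp only
  split_ifs <;> simp_all

-- ===== VERDICT (by name: the statement is the Claim_ definition above) =====
set_option maxHeartbeats 1000000 in
theorem manifest_rollup_spec : Claim_equal_manifest_rollup := by
  intro rows _
  unfold Spec_manifest_rollup manifest_rollup manifest_rollup_alt
  have hst := fun r => PySem.Str.strip (PySem.Dict.getD ⟨r⟩ "CONTENT_DISPOSITION_STATE" ("" : String))
  -- abbreviations
  set st : List (String × String) → String :=
    fun r => PySem.Str.strip (PySem.Dict.getD ⟨r⟩ "CONTENT_DISPOSITION_STATE" "") with hst_def
  set gt : List (String × String) → String :=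
    fun r => PySem.Str.strip (PySem.Dict.getD ⟨r⟩ "FACTUAL_USE_GATE" "") with hgt_def
  have hloop : pvWorstLoop rows 0 = pvWorst rows := by
    rw [pvWorstLoop_eq rows 0 (by omega) (by omega)]
    exact max_eq_right (pvWorst_nonneg rows)
  rw [hloop]
  -- A's three conditions as existentials over rows
  have hanyA : (PySem.Set.ofList (rows.map st)).any (fun state => state == "" || state == "PENDING") = true ↔
      ∃ r ∈ rows, (st r == "" || st r == "PENDING") = true := by
    constructor
    · intro h
      rcases List.any_eq_true.mp h with ⟨s, hs, hp⟩
      rcases List.mem_map.mp ((PySem.Set.mem_ofList _ _).mp hs) with ⟨r, hr, rfl⟩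
      exact ⟨r, hr, hp⟩
    · rintro ⟨r, hr, hp⟩
      exact List.any_eq_true.mpr ⟨st r, (PySem.Set.mem_ofList _ _).mpr (List.mem_map.mpr ⟨r, hr, rfl⟩), hp⟩
  have hmemS : PySem.Set.contains (PySem.Set.ofList (rows.map st)) "BLOCKED" = true ↔
      ∃ r ∈ rows, st r = "BLOCKED" := by
    simp [PySem.Set.mem_ofList, eq_comm]
  have hmemG : PySem.Set.contains (PySem.Set.ofList (rows.map gt)) "BLOCK_FACTUAL_USE" = true ↔
      ∃ r ∈ rows, gt r = "BLOCK_FACTUAL_USE" := by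
    simp [PySem.Set.mem_ofList, eq_comm]
  have hmemD : PySem.Set.contains (PySem.Set.ofList (rows.map st)) "DEFERRED" = true ↔
      ∃ r ∈ rows, st r = "DEFERRED" := by
    simp [PySem.Set.mem_ofList, eq_comm]
  by_cases hP : ∃ r ∈ rows, (st r == "" || st r == "PENDING") = true
  · -- some pending row: both return "PENDING"
    obtain ⟨r, hr, hp⟩ := hP
    have h3 : pvSeverity r = 3 := (sev_eq_three_iff r).mpr hp
    have hge : (3 : Int) ≤ pvWorst rows := h3 ▸ pvWorst_ge_of_mem hr
    rw [if_pos (hanyA.mpr ⟨r, hr, hp⟩), if_pos (by omega : pvWorst rows ≥ 3)]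
  · have hnot3 : ∀ r ∈ rows, pvSeverity r ≠ 3 := by
      intro r hr h
      exact hP ⟨r, hr, (sev_eq_three_iff r).mp h⟩
    rw [if_neg (by rw [hanyA]; exact hP)]
    have hlt3 : ¬ (pvWorst rows ≥ 3) := by
      have hle : pvWorst rows ≤ 2 := by
        apply pvWorst_le (by omega)
        intro r hr
        rcases pvSeverity_cases r with h|h|h|h <;> first | omega | exact absurd h (hnot3 r hr)
      omega
    rw [if_neg hlt3]
    by_cases hB : ∃ r ∈ rows, (st r == "BLOCKED" || gt r == "BLOCK_FACTUAL_USE") = true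
    · obtain ⟨r, hr, hb⟩ := hB
      have hnp : ¬ ((st r == "" || st r == "PENDING") = true) := fun h => hP ⟨r, hr, h⟩
      have h2 : pvSeverity r = 2 := (sev_eq_two_iff r hnp).mpr hb
      have hge : (2 : Int) ≤ pvWorst rows := h2 ▸ pvWorst_ge_of_mem hr
      have hAcond : (PySem.Set.contains (PySem.Set.ofList (rows.map st)) "BLOCKED" ||
          PySem.Set.contains (PySem.Set.ofList (rows.map gt)) "BLOCK_FACTUAL_USE") = true := by
        rw [Bool.or_eq_true] at hb ⊢
        rcases hb with h | h
        · exact Or.inl (hmemS.mpr ⟨r, hr, beq_iff_eq.mp h⟩)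
        · exact Or.inr (hmemG.mpr ⟨r, hr, beq_iff_eq.mp h⟩)
      have hle : pvWorst rows ≤ 2 := by
        apply pvWorst_le (by omega)
        intro r' hr'
        rcases pvSeverity_cases r' with h|h|h|h <;> first | omega | exact absurd h (hnot3 r' hr')
      rw [if_pos hAcond, if_pos (by rw [beq_iff_eq]; omega : (pvWorst rows == 2) = true)]
    · have hnot2 : ∀ r ∈ rows, pvSeverity r ≠ 2 := by
        intro r hr h
        have hnp : ¬ ((st r == "" || st r == "PENDING") = true) := fun hh => hP ⟨r, hr, hh⟩
        exact hB ⟨r, hr, (sev_eq_two_iff r hnp).mp h⟩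
      have hAcondF : ¬ ((PySem.Set.contains (PySem.Set.ofList (rows.map st)) "BLOCKED" ||
          PySem.Set.contains (PySem.Set.ofList (rows.map gt)) "BLOCK_FACTUAL_USE") = true) := by
        intro h
        rw [Bool.or_eq_true] at h
        rcases h with h | h
        · obtain ⟨r, hr, he⟩ := hmemS.mp h
          exact hB ⟨r, hr, by rw [Bool.or_eq_true]; exact Or.inl (beq_iff_eq.mpr he)⟩
        · obtain ⟨r, hr, he⟩ := hmemG.mp h
          exact hB ⟨r, hr, by rw [Bool.or_eq_true]; exact Or.inr (beq_iff_eq.mpr he)⟩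
      rw [if_neg hAcondF]
      have hle1 : pvWorst rows ≤ 1 := by
        apply pvWorst_le (by omega)
        intro r hr
        rcases pvSeverity_cases r with h|h|h|h <;>
          first | omega | exact absurd h (hnot2 r hr) | exact absurd h (hnot3 r hr)
      rw [if_neg (by rw [beq_iff_eq]; omega : ¬ ((pvWorst rows == 2) = true))]
      by_cases hD : ∃ r ∈ rows, st r = "DEFERRED"
      · obtain ⟨r, hr, hd⟩ := hD
        have hnp : ¬ ((st r == "" || st r == "PENDING") = true) := fun hh => hP ⟨r, hr, hh⟩
        have hnb : ¬ ((st r == "BLOCKED" || gt r == "BLOCK_FACTUAL_USE") = true) := fun hh => hB ⟨r, hr, hh⟩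
        have h1 : pvSeverity r = 1 := (sev_eq_one_iff r hnp hnb).mpr (beq_iff_eq.mpr hd)
        have hge : (1 : Int) ≤ pvWorst rows := h1 ▸ pvWorst_ge_of_mem hr
        rw [if_pos (hmemD.mpr ⟨r, hr, hd⟩), if_pos (by rw [beq_iff_eq]; omega : (pvWorst rows == 1) = true)]
      · have hnot1 : ∀ r ∈ rows, pvSeverity r ≠ 1 := by
          intro r hr h
          have hnp : ¬ ((st r == "" || st r == "PENDING") = true) := fun hh => hP ⟨r, hr, hh⟩
          have hnb : ¬ ((st r == "BLOCKED" || gt r == "BLOCK_FACTUAL_USE") = true) := fun hh => hB ⟨r, hr, hh⟩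
          exact hD ⟨r, hr, beq_iff_eq.mp ((sev_eq_one_iff r hnp hnb).mp h)⟩
        have hle0 : pvWorst rows ≤ 0 := by
          apply pvWorst_le (by omega)
          intro r hr
          rcases pvSeverity_cases r with h|h|h|h <;>
            first | omega | exact absurd h (hnot1 r hr) | exact absurd h (hnot2 r hr) | exact absurd h (hnot3 r hr)
        rw [if_neg (by rw [hmemD]; exact hD), if_neg (by rw [beq_iff_eq]; omega : ¬ ((pvWorst rows == 1) = true))]
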